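-- pv_equiv track=rewrite | github.com/pjot/advent-of-code | 2020/16/16.py | invalid_sum
-- ===== SOURCE A (Python) =====
-- def invalid_sum(ticket, rules):
--     invalid = 0
--     for n in ticket:
--         valid = False
--         for _, limits in rules:
--             for lo, hi in limits:
--                 if lo <= n <= hi:
--                     valid = True
--                 if valid:
--                     break
--             if valid:
--                 break
--         if not valid:
--             invalid += n
--     return invalid
-- ===== SOURCE B (Python) =====
-- def _covered(n, merged):
--     for lo, hi in merged:
--         if lo > n:
--             return False
--         if n <= hi:
--             return True
--     return False
--
--
-- def invalid_sum(ticket, rules):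
--     ivs = []
--     for _, limits in rules:
--         ivs.extend(limits)
--     ivs.sort(key=lambda p: p[0])
--     merged = []
--     for lo, hi in ivs:
--         if merged and lo <= merged[-1][1]:
--             ml, mh = merged[-1]
--             merged[-1] = (ml, max(mh, hi))
--         else:
--             merged.append((lo, hi))
--     total = 0
--     for n in ticket:
--         if not _covered(n, merged):
--             total += n
--     return total
-- ===== Notes on version B (the rewrite author's own statement) =====
-- stated objective: faster
-- what changed: Instead of testing every ticket value against every rule interval with nested break-flags, B collects all intervals once, sorts them by lower bound and merges overlapping ones into a sorted disjoint list, then checks each value against that merged list with an early exit once lower bounds exceed the value.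
import Mathlib
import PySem

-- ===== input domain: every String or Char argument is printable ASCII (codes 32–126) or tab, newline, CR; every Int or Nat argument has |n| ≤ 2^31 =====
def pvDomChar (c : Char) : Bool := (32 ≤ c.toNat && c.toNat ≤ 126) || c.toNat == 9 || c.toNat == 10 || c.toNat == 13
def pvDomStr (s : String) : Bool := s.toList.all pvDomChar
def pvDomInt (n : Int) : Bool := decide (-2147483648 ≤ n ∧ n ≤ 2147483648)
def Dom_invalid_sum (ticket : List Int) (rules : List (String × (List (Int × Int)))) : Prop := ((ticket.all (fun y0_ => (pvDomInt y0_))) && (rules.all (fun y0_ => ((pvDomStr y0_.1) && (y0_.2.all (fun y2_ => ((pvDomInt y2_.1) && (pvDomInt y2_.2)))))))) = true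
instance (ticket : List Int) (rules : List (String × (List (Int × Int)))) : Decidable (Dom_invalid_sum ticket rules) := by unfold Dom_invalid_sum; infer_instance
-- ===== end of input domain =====

-- B replaces A's per-value scan over all rule intervals by a one-time sort-and-merge of the
-- intervals into a sorted disjoint list scanned with early exit (alternative algorithm, same worst-case cost).


-- ===== PORT A =====
-- inner 'for lo, hi in limits' loop with its 'if valid: break'
def pvLoopLimits (n : Int) : List (Int × Int) → Bool → Bool
  | [], valid => valid
  | (lo, hi) :: rest, valid =>
    let v := if lo ≤ n ∧ n ≤ hi then true else valid
    if v then v else pvLoopLimits n rest v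

-- outer 'for _, limits in rules' loop with its 'if valid: break'
def pvLoopRules (n : Int) : List (String × (List (Int × Int))) → Bool → Bool
  | [], valid => valid
  | (_, limits) :: rest, valid =>
    let v := pvLoopLimits n limits valid
    if v then v else pvLoopRules n rest v

def invalid_sum (ticket : List Int) (rules : List (String × (List (Int × Int)))) : Int :=
  ticket.foldl (fun invalid n => if pvLoopRules n rules false = false then invalid + n else invalid) 0

-- ===== PORT B =====
-- one step of B's merging loop; merged is kept head-reversed (head = Python's merged[-1])
def pvMergeStep (acc : List (Int × Int)) (p : Int × Int) : List (Int × Int) :=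
  match acc with
  | (ml, mh) :: t => if p.1 ≤ mh then (ml, max mh p.2) :: t else p :: (ml, mh) :: t
  | [] => [p]

-- B's _covered: scan the sorted disjoint list, early exit once lo > n
def pvCovered (n : Int) : List (Int × Int) → Bool
  | [] => false
  | (lo, hi) :: rest => if lo > n then false else if n ≤ hi then true else pvCovered n rest

def invalid_sum_alt (ticket : List Int) (rules : List (String × (List (Int × Int)))) : Int :=
  let ivs := rules.foldl (fun acc r => acc ++ r.2) []
  let sortedIvs := PySem.List.sorted ivs (fun p => p.1) false
  let merged := (sortedIvs.foldl pvMergeStep []).reverse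
  ticket.foldl (fun total n => if pvCovered n merged = false then total + n else total) 0

-- ===== PRECONDITION & SPEC =====
def Spec_invalid_sum (ticket : List Int) (rules : List (String × (List (Int × Int)))) (out : Int) : Prop := out = invalid_sum_alt ticket rules
instance (ticket : List Int) (rules : List (String × (List (Int × Int)))) (out : Int) : Decidable (Spec_invalid_sum ticket rules out) := by unfold Spec_invalid_sum; infer_instance

-- ===== CLAIM (what is proved, stated in full; the proofs are below) =====
def Claim_equal_invalid_sum : Prop := ∀ (ticket : List Int) (rules : List (String × (List (Int × Int)))), Dom_invalid_sum ticket rules → Spec_invalid_sum ticket rules (invalid_sum ticket rules)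

-- ===== LEMMAS AND PROOFS =====

-- the per-value membership predicate both programs decide
def pvHit (n : Int) (p : Int × Int) : Bool := decide (p.1 ≤ n ∧ n ≤ p.2)

lemma pvLoopLimits_eq (n : Int) (ls : List (Int × Int)) (v : Bool) :
    pvLoopLimits n ls v = (v || ls.any (pvHit n)) := by
  induction ls generalizing v with
  | nil => simp [pvLoopLimits]
  | cons p rest ih =>
    obtain ⟨lo, hi⟩ := p
    by_cases h : lo ≤ n ∧ n ≤ hi <;> cases v <;>
      simp [pvLoopLimits, h, ih, pvHit]

lemma pvLoopRules_eq (n : Int) (rs : List (String × (List (Int × Int)))) (v : Bool) :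
    pvLoopRules n rs v = (v || (rs.flatMap (·.2)).any (pvHit n)) := by
  induction rs generalizing v with
  | nil => simp [pvLoopRules]
  | cons r rest ih =>
    obtain ⟨name, limits⟩ := r
    simp only [pvLoopRules, pvLoopLimits_eq]
    cases v <;> cases h : limits.any (pvHit n) <;>
      simp [ih, List.any_append, h]

-- merging invariant: the fold preserves coverage and keeps the accumulator fst-descending
lemma pvMerge_inv (n : Int) : ∀ (l acc : List (Int × Int)),
    l.Pairwise (fun a b => a.1 ≤ b.1) →
    acc.Pairwise (fun a b => b.1 ≤ a.1) →
    (∀ p, acc.head? = some p → ∀ q ∈ l, p.1 ≤ q.1) →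
    (l.foldl pvMergeStep acc).any (pvHit n) = (acc.any (pvHit n) || l.any (pvHit n))
    ∧ (l.foldl pvMergeStep acc).Pairwise (fun a b => b.1 ≤ a.1) := by
  intro l
  induction l with
  | nil => intro acc _ hacc _; simpa using hacc
  | cons p l' ih =>
    intro acc hl hacc hb
    obtain ⟨lo, hi⟩ := p
    rw [List.pairwise_cons] at hl
    obtain ⟨hplo, hl'⟩ := hl
    have step : ∀ (hacc' : (pvMergeStep acc (lo, hi)).Pairwise (fun a b => b.1 ≤ a.1))
        (hb' : ∀ p, (pvMergeStep acc (lo, hi)).head? = some p → ∀ q ∈ l', p.1 ≤ q.1)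
        (hcov : (pvMergeStep acc (lo, hi)).any (pvHit n)
            = (acc.any (pvHit n) || pvHit n (lo, hi))),
        (List.foldl pvMergeStep acc ((lo, hi) :: l')).any (pvHit n)
          = (acc.any (pvHit n) || ((lo, hi) :: l').any (pvHit n))
        ∧ (List.foldl pvMergeStep acc ((lo, hi) :: l')).Pairwise (fun a b => b.1 ≤ a.1) := by
      intro hacc' hb' hcov
      obtain ⟨c1, c2⟩ := ih (pvMergeStep acc (lo, hi)) hl' hacc' hb'
      refine ⟨?_, by simpa using c2⟩
      simp only [List.foldl_cons] at *
      rw [c1, hcov, List.any_cons, Bool.or_assoc]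
    cases acc with
    | nil =>
      apply step
      · simp [pvMergeStep]
      · intro q hq q' hq'
        simp [pvMergeStep] at hq
        subst hq
        exact hplo q' hq'
      · simp [pvMergeStep]
    | cons m t =>
      obtain ⟨ml, mh⟩ := m
      have hml : ml ≤ lo := hb (ml, mh) rfl (lo, hi) (List.mem_cons_self)
      rw [List.pairwise_cons] at hacc
      obtain ⟨htle, ht⟩ := hacc
      by_cases hc : lo ≤ mh
      · apply step
        · simp only [pvMergeStep, if_pos hc]
          exact List.pairwise_cons.mpr ⟨fun b hb' => htle b hb', ht⟩
        · intro q hq q' hq'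
          simp only [pvMergeStep, if_pos hc, List.head?_cons, Option.some.injEq] at hq
          subst hq
          exact le_trans hml (hplo q' hq')
        · simp only [pvMergeStep, if_pos hc, List.any_cons]
          cases hrest : t.any (pvHit n)
          · simp only [Bool.or_false]
            rw [Bool.eq_iff_iff]
            simp only [pvHit, Bool.or_eq_true, decide_eq_true_eq]
            rcases le_total mh hi with hm | hm <;>
              simp only [max_eq_right hm, max_eq_left hm] <;> constructor <;> intro h <;> omega
          · simp
      · apply step
        · simp only [pvMergeStep, if_neg hc]
          refine List.pairwise_cons.mpr ⟨?_, List.pairwise_cons.mpr ⟨htle, ht⟩⟩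
          intro b hbmem
          rcases List.mem_cons.mp hbmem with h | h
          · subst h; exact hml
          · exact le_trans (htle b h) hml
        · intro q hq q' hq'
          simp only [pvMergeStep, if_neg hc, List.head?_cons, Option.some.injEq] at hq
          subst hq
          exact hplo q' hq'
        · simp only [pvMergeStep, if_neg hc, List.any_cons]
          cases hph : pvHit n (lo, hi) <;> simp

lemma pvCovered_eq_any (n : Int) : ∀ (l : List (Int × Int)),
    l.Pairwise (fun a b => a.1 ≤ b.1) → pvCovered n l = l.any (pvHit n) := by
  intro l
  induction l with
  | nil => simp [pvCovered]
  | cons p rest ih =>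
    intro hp
    obtain ⟨lo, hi⟩ := p
    rw [List.pairwise_cons] at hp
    obtain ⟨hall, hrest⟩ := hp
    by_cases h1 : lo > n
    · have hnone : rest.any (pvHit n) = false := by
        rw [List.any_eq_false]
        intro q hq
        have := hall q hq
        simp only [pvHit, decide_eq_true_eq]
        omega
      have hhead : pvHit n (lo, hi) = false := by
        simp only [pvHit, decide_eq_false_iff_not]
        omega
      simp [pvCovered, h1, hnone, hhead]
    · by_cases h2 : n ≤ hi
      · have hhead : pvHit n (lo, hi) = true := by
          simp only [pvHit, decide_eq_true_eq]
          omega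
        simp [pvCovered, h1, h2, hhead]
      · have hhead : pvHit n (lo, hi) = false := by
          simp only [pvHit, decide_eq_false_iff_not]
          omega
        simp [pvCovered, h1, h2, hhead, ih hrest]

-- per-value agreement: B's covered test over the merged list decides exactly A's any-interval test
lemma pvCovered_merged (n : Int) (rules : List (String × (List (Int × Int)))) :
    pvCovered n (((PySem.List.sorted (rules.foldl (fun acc r => acc ++ r.2) []) (fun p => p.1) false).foldl pvMergeStep []).reverse)
      = (rules.flatMap (·.2)).any (pvHit n) := by
  set ivs := rules.foldl (fun acc r => acc ++ r.2) [] with hivs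
  have hflat : ivs = rules.flatMap (·.2) := by
    rw [hivs, PySem.List.foldl_append_eq_flatMap]; simp
  set s := PySem.List.sorted ivs (fun p => p.1) false with hs
  have hsp : s.Pairwise (fun a b => a.1 ≤ b.1) := PySem.List.sorted_pairwise ivs (fun p => p.1)
  obtain ⟨hcov, hord⟩ := pvMerge_inv n s [] hsp (by simp) (by simp)
  rw [pvCovered_eq_any n _ (by rwa [List.pairwise_reverse]), List.any_reverse, hcov]
  simp only [List.any_nil, Bool.false_or]
  rw [← hflat]
  exact (PySem.List.sorted_perm ivs (fun p => p.1) false).any_eq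

-- ===== VERDICT (by name: the statement is the Claim_ definition above) =====
theorem invalid_sum_spec : Claim_equal_invalid_sum := by
  intro ticket rules _
  unfold Spec_invalid_sum
  simp only [invalid_sum, invalid_sum_alt]
  apply PySem.List.foldl_congr_mem
  intro acc n _
  rw [pvLoopRules_eq, pvCovered_merged, Bool.false_or]
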